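-- pv_equiv track=rewrite | github.com/wanyue9948/hello-world | test2.py | solution
-- ===== SOURCE A (Python) =====
-- from copy import deepcopy
--
-- def isAesthetic(tree):
--     type = -1
--     n = len(tree)
--     if tree[0] < tree[1]:
--         type = 0
--     elif tree[0] > tree[1]:
--         type = 1
--     if type == -1:
--         return False
--     if type == 0:
--         if n == 3:
--             if tree[1] <= tree[2]:
--                 return False
--         for i in range(2, n - 1,2):
--             if tree[i - 1] > tree[i] and tree[i] < tree[i+1]:
--                 continue
--             else:
--                 return False
--     elif type == 1:
--         if n == 3:
--             if tree[1] >= tree[2]: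
--                 return False
--         for i in range(2, n-1, 2):
--             if tree[i - 1] < tree[i] and tree[i] > tree[i + 1]:
--                 continue
--             else:
--                 return False
--     return True
--
-- def solution(A):
--     # write your code in Python 3.6
--     if isAesthetic(A):
--         return 0
--     n = len(A)
--     result = 0
--     for i in range(n):
--         deleted_A = deepcopy(A)
--         deleted_A.pop(i)
--         aesthetic = isAesthetic(deleted_A)
--         if aesthetic:
--             result += 1
--     if result == 0:
--         return -1
--     return result
-- ===== SOURCE B (Python) =====
-- def _zig(C):
--     # strict alternation of adjacent comparisons: every step goes the
--     # opposite direction of the previous one, and no step is flat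
--     prev = 0
--     for j in range(len(C) - 1):
--         cur = 1 if C[j] < C[j + 1] else -1 if C[j] > C[j + 1] else 0
--         if cur == 0 or cur == prev:
--             return False
--         prev = cur
--     return True
--
-- def solution(A):
--     if _zig(A):
--         return 0
--     result = sum(1 for i in range(len(A)) if _zig(A[:i] + A[i + 1:]))
--     return result if result else -1
-- ===== Notes on version B (the rewrite author's own statement) =====
-- stated objective: alternative
-- what changed: B replaces A's type-cased parity-stepped triple checks (with deepcopy+pop per candidate) by a single edge-sign alternation scan with early exit, applied to each candidate built from two slices; Pre_ excludes only inputs where A raises IndexError (length < 2, or two equal elements).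
-- intended difference: On arrays where the array itself or some single deletion has odd length >= 5, zigzags except at its very last pair, A's checker (which skips that pair) accepts it — A returns 0 or an overcount — while B applies the full alternation test and returns the intended count; e.g. on [1,3,2,4,5] A returns 0, B returns 2. — e.g. on solution([1, 3, 2, 4, 5]): A returns 0, B returns 2
import Mathlib
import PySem

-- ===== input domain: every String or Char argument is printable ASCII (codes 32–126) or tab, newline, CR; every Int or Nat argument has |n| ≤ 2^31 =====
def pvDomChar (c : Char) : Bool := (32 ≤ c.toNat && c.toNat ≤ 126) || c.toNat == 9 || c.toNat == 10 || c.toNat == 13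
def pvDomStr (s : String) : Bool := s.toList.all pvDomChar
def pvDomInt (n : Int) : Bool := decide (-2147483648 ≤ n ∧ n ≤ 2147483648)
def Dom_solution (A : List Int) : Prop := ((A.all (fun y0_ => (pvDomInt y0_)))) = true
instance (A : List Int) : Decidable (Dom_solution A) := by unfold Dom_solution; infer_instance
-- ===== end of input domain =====

-- B replaces A's deepcopy-pop-and-recheck with an edge-sign alternation scan over each
-- candidate deletion built from two slices; B checks ALL adjacent pairs, so on the
-- exceptional inputs described at D_solution it returns the intended value where A does not.

-- ===== PORT A =====
-- Port of A's helper isAesthetic; tree[i] is ported as pyGetD (every index the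
-- checker reads is in range on the inputs Pre_solution admits).
def isAesthetic (tree : List Int) : Bool :=
  let g : Int → Int := fun i => PySem.List.pyGetD tree i 0
  let n : Int := PySem.List.len tree
  let ty : Int := if g 0 < g 1 then 0 else if g 0 > g 1 then 1 else -1
  if ty = -1 then false
  else if ty = 0 then
    if n = 3 ∧ g 1 ≤ g 2 then false
    else (PySem.List.pyRange 2 (n - 1) 2).all (fun i => decide (g (i - 1) > g i ∧ g i < g (i + 1)))
  else
    if n = 3 ∧ g 1 ≥ g 2 then false
    else (PySem.List.pyRange 2 (n - 1) 2).all (fun i => decide (g (i - 1) < g i ∧ g i > g (i + 1)))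

def solution (A : List Int) : Int :=
  if isAesthetic A then 0
  else
    let n : Int := PySem.List.len A
    let result : Int :=
      (PySem.List.pyRange 0 n 1).foldl (fun r i =>
        let deleted := ((PySem.List.pop? A i).map Prod.snd).getD []
        if isAesthetic deleted then r + 1 else r) 0
    if result = 0 then -1 else result

-- ===== PORT B =====
def pvSign (a b : Int) : Int := if a < b then 1 else if a > b then -1 else 0

-- one step of B's _zig loop: the Bool is "no failure yet", the Int the previous sign
def pvZstep (s : Int → Int) (st : Bool × Int) (j : Int) : Bool × Int :=
  if st.1 then
    let cur := s j
    if cur = 0 ∨ cur = st.2 then (false, st.2) else (true, cur)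
  else st

def pvZig (C : List Int) : Bool :=
  let g : Int → Int := fun i => PySem.List.pyGetD C i 0
  ((PySem.List.pyRange 0 (PySem.List.len C - 1) 1).foldl
      (pvZstep (fun j => pvSign (g j) (g (j + 1)))) (true, 0)).1

def solution_alt (A : List Int) : Int :=
  if pvZig A then 0
  else
    let result : Int :=
      (PySem.List.pyRange 0 (PySem.List.len A) 1).foldl (fun r i =>
        if pvZig (PySem.List.slice A none (some i) ++ PySem.List.slice A (some (i + 1)) none)
        then r + 1 else r) 0
    if result ≠ 0 then result else -1

-- ===== PRECONDITION & SPEC =====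
-- Pre_ excludes exactly the inputs on which Python A raises IndexError: lists of
-- length < 2, and two-element lists with equal entries (their deletions have length 1).
def Pre_solution (A : List Int) : Prop :=
  2 ≤ A.length ∧ (A.length = 2 → PySem.List.pyGet? A 0 ≠ PySem.List.pyGet? A 1)
instance (A : List Int) : Decidable (Pre_solution A) := by unfold Pre_solution; infer_instance

def pvWitness_solution : List Int := [1, 2, 3]

-- full zigzag: every adjacent pair strict, every consecutive comparison alternates
def pvZZ (C : List Int) : Prop :=
  (∀ j ∈ List.range (C.length - 1), C.getD j 0 ≠ C.getD (j + 1) 0) ∧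
  (∀ j ∈ List.range (C.length - 2),
      ((C.getD j 0 < C.getD (j + 1) 0) ↔ (C.getD (j + 2) 0 < C.getD (j + 1) 0)))

-- zigzag except at the very last pair (odd length ≥ 5)
def pvSNF (C : List Int) : Prop :=
  5 ≤ C.length ∧ C.length % 2 = 1 ∧ pvZZ C.dropLast ∧ ¬ pvZZ C

-- A's parity-stepped checker never inspects the last pair of an odd-length array of 5 or
-- more, so A accepts such almost-zigzag arrays (returning 0, or counting their deletions):
-- B applies the full alternation test there, the intended notion of aesthetic.
def D_solution (A : List Int) : Prop :=
  pvSNF A ∨ (¬ pvZZ A ∧ ∃ i ∈ List.range A.length, pvSNF (A.eraseIdx i))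
instance (A : List Int) : Decidable (D_solution A) := by
  unfold D_solution pvSNF pvZZ; infer_instance

def Spec_solution (A : List Int) (out : Int) : Prop := ¬ D_solution A → out = solution_alt A
instance (A : List Int) (out : Int) : Decidable (Spec_solution A out) := by
  unfold Spec_solution; infer_instance

def pvDiffWitness_solution : List Int := [1, 3, 2, 4, 5]
def pvDiffWitnessOut_solution : Int × Int := (0, 2)

-- ===== CLAIM (what is proved, stated in full; the proofs are below) =====
def Claim_unchanged_solution : Prop :=
  ∀ (A : List Int), Dom_solution A → Pre_solution A → Spec_solution A (solution A)
def Claim_changed_solution : Prop :=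
  Dom_solution (pvDiffWitness_solution) ∧ Pre_solution (pvDiffWitness_solution) ∧
  D_solution (pvDiffWitness_solution) ∧
  solution (pvDiffWitness_solution) = pvDiffWitnessOut_solution.1 ∧
  solution_alt (pvDiffWitness_solution) = pvDiffWitnessOut_solution.2 ∧
  pvDiffWitnessOut_solution.1 ≠ pvDiffWitnessOut_solution.2
def Claim_exact_solution : Prop :=
  ∀ (A : List Int), Dom_solution A → Pre_solution A → D_solution A →
    solution A ≠ solution_alt A

-- ===== LEMMAS AND PROOFS =====

-- proof-side abbreviations: the element reader, the edge sign s_j, and the index L of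
-- the last edge A's parity-stepped checker looks at
def pvG (C : List Int) (i : Int) : Int := PySem.List.pyGetD C i 0
def pvS (C : List Int) (j : Int) : Int := pvSign (pvG C j) (pvG C (j + 1))
def pvL (C : List Int) : Int :=
  if PySem.Int.mod ((C.length : Int)) 2 = 0 ∨ (C.length : Int) = 3
  then (C.length : Int) - 2 else (C.length : Int) - 3

-- "edges 0..L alternate": the chain form both checkers reduce to
def pvChainTo (C : List Int) (L : Int) : Prop :=
  pvS C 0 ≠ 0 ∧ ∀ j : Int, 1 ≤ j → j < L + 1 → pvS C j = -(pvS C (j - 1))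

theorem pvSign_eq_one_iff (a b : Int) : pvSign a b = 1 ↔ a < b := by
  unfold pvSign; split_ifs <;> simp_all

theorem pvSign_eq_neg_one_iff (a b : Int) : pvSign a b = -1 ↔ b < a := by
  unfold pvSign; split_ifs <;> simp_all <;> omega

theorem pvSign_eq_zero_iff (a b : Int) : pvSign a b = 0 ↔ a = b := by
  unfold pvSign; split_ifs <;> simp_all <;> omega

theorem pvSign_cases (a b : Int) : pvSign a b = 1 ∨ pvSign a b = -1 ∨ pvSign a b = 0 := by
  unfold pvSign; split_ifs <;> simp

theorem pvZstep_stay_false (s : Int → Int) (l : List Int) (x : Int) :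
    l.foldl (pvZstep s) (false, x) = (false, x) := by
  induction l with
  | nil => rfl
  | cons y ys ih => simp only [List.foldl_cons, pvZstep]; simpa using ih

theorem pvZig_chain_iff (s : Int → Int)
    (hs : ∀ j : Int, s j = 1 ∨ s j = -1 ∨ s j = 0) (k : Nat) :
    ∀ a : Int, s (a - 1) ≠ 0 →
      ((((PySem.List.pyRange a (a + k) 1).foldl (pvZstep s) (true, s (a - 1))).1 = true)
        ↔ ∀ j : Int, a ≤ j → j < a + k → s j = -(s (j - 1))) := by
  induction k with
  | zero =>
      intro a _
      rw [show a + ((0:Nat):Int) = a by push_cast; ring, PySem.List.pyRange_one_eq_nil le_rfl]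
      simp only [List.foldl_nil]
      constructor
      · intro _ j h1 h2; omega
      · intro _; trivial
  | succ k ih =>
      intro a hprev
      rw [PySem.List.pyRange_one_cons (by push_cast; omega), List.foldl_cons]
      by_cases h : s a = -(s (a - 1))
      · have hcond : ¬ (s a = 0 ∨ s a = s (a - 1)) := by omega
        rw [show pvZstep s (true, s (a - 1)) a = (true, s a) by simp [pvZstep, hcond]]
        rw [show a + ((k+1:Nat):Int) = (a + 1) + ((k:Nat):Int) by push_cast; ring]
        have ih' := ih (a + 1) (by rw [show (a + 1) - 1 = a by ring]; omega)
        rw [show (a + 1) - 1 = a by ring] at ih'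
        rw [ih']
        constructor
        · intro H j h1 h2
          by_cases hj : j = a
          · subst hj; exact h
          · exact H j (by omega) h2
        · intro H j h1 h2; exact H j (by omega) (by omega)
      · have hcond : s a = 0 ∨ s a = s (a - 1) := by
          rcases hs a with h' | h' | h' <;> rcases hs (a - 1) with h'' | h'' | h'' <;> omega
        rw [show pvZstep s (true, s (a - 1)) a = (false, s (a - 1)) by simp [pvZstep, hcond]]
        rw [pvZstep_stay_false]
        simp only [Bool.false_eq_true, false_iff, not_forall]
        push Not
        exact ⟨a, le_rfl, by push_cast; omega, h⟩

-- B's checker = the chain form over ALL edges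
theorem pvZig_iff (C : List Int) (h2 : 2 ≤ C.length) :
    (pvZig C = true) ↔ pvChainTo C ((C.length : Int) - 2) := by
  unfold pvZig pvChainTo
  simp only [PySem.List.len_eq]
  rw [show (fun j => pvSign (PySem.List.pyGetD C j 0) (PySem.List.pyGetD C (j + 1) 0))
      = pvS C from rfl]
  rw [PySem.List.pyRange_one_cons (by omega), List.foldl_cons,
      show (0:Int) + 1 = 1 by norm_num]
  by_cases h0 : pvS C 0 = 0
  · rw [show pvZstep (pvS C) (true, 0) 0 = (false, 0) by simp [pvZstep, h0]]
    rw [pvZstep_stay_false]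
    simp [h0]
  · rw [show pvZstep (pvS C) (true, 0) 0 = (true, pvS C 0) by simp [pvZstep, h0]]
    have key := pvZig_chain_iff (pvS C) (fun j => pvSign_cases _ _) (C.length - 2) 1
      (by rw [show (1:Int) - 1 = 0 by norm_num]; exact h0)
    rw [show (1:Int) - 1 = 0 by norm_num] at key
    rw [show ((C.length : Int) - 1) = 1 + ((C.length - 2 : Nat) : Int) by omega]
    rw [key]
    constructor
    · intro H; exact ⟨h0, fun j h1 hj => H j h1 (by omega)⟩
    · intro H j h1 hj; exact H.2 j h1 (by omega)

theorem pvG_natCast (C : List Int) (t : Nat) : pvG C (t : Int) = C.getD t 0 := by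
  simp [pvG, PySem.List.pyGetD_natCast]

theorem pvS_natCast (C : List Int) (t : Nat) :
    pvS C (t : Int) = pvSign (C.getD t 0) (C.getD (t + 1) 0) := by
  unfold pvS
  rw [pvG_natCast, show ((t : Int) + 1) = ((t + 1 : Nat) : Int) by push_cast; ring, pvG_natCast]

theorem pvAlt_sign_iff (a b c : Int) (h1 : pvSign a b ≠ 0) (h2 : pvSign b c ≠ 0) :
    (pvSign b c = -(pvSign a b)) ↔ ((a < b) ↔ (c < b)) := by
  unfold pvSign at h1 h2 ⊢
  split_ifs at h1 h2 ⊢ <;> first | omega | (simp_all; omega)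

-- the declarative spec pvZZ = the chain form over all edges
theorem pvZZ_iff_chain (C : List Int) (h2 : 2 ≤ C.length) :
    pvZZ C ↔ pvChainTo C ((C.length : Int) - 2) := by
  unfold pvZZ pvChainTo
  simp only [List.mem_range]
  constructor
  · rintro ⟨hne, halt⟩
    have hnz : ∀ t : Nat, t < C.length - 1 → pvS C (t : Int) ≠ 0 := by
      intro t ht
      rw [pvS_natCast, Ne, pvSign_eq_zero_iff]
      exact hne t ht
    refine ⟨by exact_mod_cast hnz 0 (by omega), ?_⟩
    intro j h1 hj
    obtain ⟨t, rfl⟩ : ∃ t : Nat, j = (t : Int) + 1 := ⟨(j - 1).toNat, by omega⟩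
    rw [show (t : Int) + 1 - 1 = (t : Int) by ring,
        show (t : Int) + 1 = ((t + 1 : Nat) : Int) by push_cast; ring,
        pvS_natCast, pvS_natCast]
    have ht2 : t < C.length - 2 := by omega
    have e1 : pvSign (C.getD t 0) (C.getD (t + 1) 0) ≠ 0 := by
      rw [Ne, pvSign_eq_zero_iff]; exact hne t (by omega)
    have e2 : pvSign (C.getD (t + 1) 0) (C.getD (t + 1 + 1) 0) ≠ 0 := by
      rw [Ne, pvSign_eq_zero_iff]; exact hne (t + 1) (by omega)
    exact (pvAlt_sign_iff _ _ _ e1 e2).mpr (by simpa using halt t ht2)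
  · rintro ⟨h0, hch⟩
    have hnz : ∀ t : Nat, (t : Int) < (C.length : Int) - 1 → pvS C (t : Int) ≠ 0 := by
      intro t
      induction t with
      | zero => intro _; exact_mod_cast h0
      | succ t ih =>
          intro ht
          have e := hch ((t : Int) + 1) (by omega) (by push_cast at ht ⊢; omega)
          rw [show (t : Int) + 1 - 1 = (t : Int) by ring] at e
          have := ih (by push_cast at ht ⊢; omega)
          rw [show ((t + 1 : Nat) : Int) = (t : Int) + 1 by push_cast; ring, e]
          omega
    constructor
    · intro t ht
      have := hnz t (by omega)
      rw [pvS_natCast, Ne, pvSign_eq_zero_iff] at this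
      exact this
    · intro t ht
      have e := hch ((t : Int) + 1) (by omega) (by omega)
      rw [show (t : Int) + 1 - 1 = (t : Int) by ring,
          show (t : Int) + 1 = ((t + 1 : Nat) : Int) by push_cast; ring,
          pvS_natCast, pvS_natCast] at e
      have e1 : pvSign (C.getD t 0) (C.getD (t + 1) 0) ≠ 0 := by
        have := hnz t (by omega); rwa [pvS_natCast] at this
      have e2 : pvSign (C.getD (t + 1) 0) (C.getD (t + 1 + 1) 0) ≠ 0 := by
        have := hnz (t + 1) (by push_cast; omega); rwa [pvS_natCast] at this
      have := (pvAlt_sign_iff _ _ _ e1 e2).mp (by simpa using e)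
      simpa using this

theorem pvZig_ZZ (C : List Int) (h2 : 2 ≤ C.length) : (pvZig C = true) ↔ pvZZ C :=
  (pvZig_iff C h2).trans (pvZZ_iff_chain C h2).symm

-- getD commutes with dropLast below the cut
theorem getD_dropLast (C : List Int) (t : Nat) (h : t < C.length - 1) :
    (C.dropLast).getD t 0 = C.getD t 0 := by
  rw [List.getD_eq_getElem?_getD, List.getD_eq_getElem?_getD,
      List.getElem?_eq_getElem (by simp [List.length_dropLast]; omega),
      List.getElem?_eq_getElem (by omega)]
  simp [List.getElem_dropLast]

theorem pvS_dropLast (C : List Int) (j : Int) (h0 : 0 ≤ j)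
    (h : j + 2 ≤ (C.length : Int) - 1) : pvS (C.dropLast) j = pvS C j := by
  obtain ⟨t, rfl⟩ : ∃ t : Nat, j = (t : Int) := ⟨j.toNat, by omega⟩
  rw [pvS_natCast, pvS_natCast, getD_dropLast C t (by omega), getD_dropLast C (t+1) (by omega)]

theorem chainTo_dropLast (C : List Int) (L : Int) (hL0 : 0 ≤ L)
    (hL : L + 2 ≤ (C.length : Int) - 1) :
    pvChainTo C L ↔ pvChainTo (C.dropLast) L := by
  unfold pvChainTo
  have e : ∀ j : Int, 0 ≤ j → j ≤ L → pvS (C.dropLast) j = pvS C j := by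
    intro j hj0 hjL; exact pvS_dropLast C j hj0 (by omega)
  rw [e 0 le_rfl hL0]
  refine and_congr_right fun _ => ⟨fun H j h1 hj => ?_, fun H j h1 hj => ?_⟩
  · rw [e j (by omega) (by omega), e (j - 1) (by omega) (by omega)]; exact H j h1 hj
  · have := H j h1 hj
    rwa [e j (by omega) (by omega), e (j - 1) (by omega) (by omega)] at this

theorem pvZZ_dropLast_of (C : List Int) (h : pvZZ C) : pvZZ (C.dropLast) := by
  obtain ⟨h1, h2⟩ := h
  constructor
  · intro t ht
    rw [List.mem_range, List.length_dropLast] at ht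
    rw [getD_dropLast C t (by omega), getD_dropLast C (t+1) (by omega)]
    exact h1 t (by rw [List.mem_range]; omega)
  · intro t ht
    rw [List.mem_range, List.length_dropLast] at ht
    rw [getD_dropLast C t (by omega), getD_dropLast C (t+1) (by omega),
        getD_dropLast C (t+2) (by omega)]
    exact h2 t (by rw [List.mem_range]; omega)

theorem chain_iff_pointwise (s : Int → Int) (L : Int) :
    (∀ j : Int, 1 ≤ j → j < L + 1 → s j = -(s (j - 1)))
  ↔ (∀ j : Int, 1 ≤ j → j < L + 1 → s j = (if j % 2 = 0 then s 0 else -(s 0))) := by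
  constructor
  · intro H
    have key : ∀ t : Nat, ((t : Int) + 1 < L + 1) →
        s ((t : Int) + 1) = (if ((t : Int) + 1) % 2 = 0 then s 0 else -(s 0)) := by
      intro t
      induction t with
      | zero =>
          intro h
          have h1 := H 1 (by omega) (by omega)
          norm_num at h1 ⊢
          exact h1
      | succ t ih =>
          intro h
          have hc := H ((t : Int) + 1 + 1) (by omega) (by push_cast at h ⊢; omega)
          have ht : ((t : Int) + 1 + 1) - 1 = (t : Int) + 1 := by ring
          rw [ht] at hc
          have hp := ih (by push_cast at h ⊢; omega)
          rw [hp] at hc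
          by_cases he : (((t + 1 : Nat) : Int) + 1) % 2 = 0
          · have ho : ¬ (((t : Nat) : Int) + 1) % 2 = 0 := by push_cast at he ⊢; omega
            rw [if_pos he]
            rw [if_neg ho] at hc
            rw [show ((t + 1 : Nat) : Int) + 1 = (t : Int) + 1 + 1 by push_cast; ring, hc]; ring
          · have ho : (((t : Nat) : Int) + 1) % 2 = 0 := by push_cast at he ⊢; omega
            rw [if_neg he]
            rw [if_pos ho] at hc
            rw [show ((t + 1 : Nat) : Int) + 1 = (t : Int) + 1 + 1 by push_cast; ring, hc]
    intro j h1 h2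
    obtain ⟨t, rfl⟩ : ∃ t : Nat, j = (t : Int) + 1 := ⟨(j - 1).toNat, by omega⟩
    exact key t h2
  · intro H j h1 h2
    have hj := H j h1 h2
    by_cases hb : j = 1
    · subst hb
      norm_num at hj
      rw [hj, show (1 : Int) - 1 = 0 from rfl]
    · have h0 := H (j - 1) (by omega) (by omega)
      by_cases hp : j % 2 = 0
      · have hp' : ¬ (j - 1) % 2 = 0 := by omega
        rw [if_pos hp] at hj
        rw [if_neg hp'] at h0
        rw [hj, h0]; ring
      · have hp' : (j - 1) % 2 = 0 := by omega
        rw [if_neg hp] at hj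
        rw [if_pos hp'] at h0
        rw [hj, h0]

theorem triples_iff_edges (s : Int → Int) (m L d : Int)
    (hL : L = if m % 2 = 0 then m - 2 else m - 3) :
    (∀ i : Int, 2 ≤ i → i < m - 1 → 2 ∣ i - 2 → s (i - 1) = -d ∧ s i = d)
  ↔ (∀ j : Int, 1 ≤ j → j < L + 1 → s j = (if j % 2 = 0 then d else -d)) := by
  have hLc : (m % 2 = 0 ∧ L = m - 2) ∨ (m % 2 = 1 ∧ L = m - 3) := by
    by_cases h : m % 2 = 0
    · left; rw [if_pos h] at hL; exact ⟨h, hL⟩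
    · right; rw [if_neg h] at hL; exact ⟨by omega, hL⟩
  constructor
  · intro H j h1 h2
    by_cases hp : j % 2 = 0
    · rw [if_pos hp]
      exact (H j (by omega) (by rcases hLc with ⟨h, hl⟩ | ⟨h, hl⟩ <;> omega) (by omega)).2
    · rw [if_neg hp]
      have := (H (j + 1) (by omega) (by rcases hLc with ⟨h, hl⟩ | ⟨h, hl⟩ <;> omega) (by omega)).1
      rwa [show j + 1 - 1 = j by ring] at this
  · intro H i h2i him hdvd
    constructor
    · have := H (i - 1) (by omega) (by rcases hLc with ⟨h, hl⟩ | ⟨h, hl⟩ <;> omega)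
      rwa [if_neg (by omega)] at this
    · have := H i (by omega) (by rcases hLc with ⟨h, hl⟩ | ⟨h, hl⟩ <;> omega)
      rwa [if_pos (by omega)] at this

theorem pvL_eq_of_ne_three (C : List Int) (hm3 : (C.length : Int) ≠ 3) :
    pvL C = if (C.length : Int) % 2 = 0 then (C.length : Int) - 2 else (C.length : Int) - 3 := by
  unfold pvL
  rw [PySem.Int.mod_eq_emod_of_pos (by omega)]
  by_cases h : (C.length : Int) % 2 = 0
  · rw [if_pos (Or.inl h), if_pos h]
  · rw [if_neg (by tauto), if_neg h]

theorem all_triples_iff (C : List Int) (d : Int) (P : Int → Bool)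
    (hP : ∀ i : Int, (P i = true) ↔ (pvS C (i - 1) = -d ∧ pvS C i = d))
    (hm3 : (C.length : Int) ≠ 3) :
    ((PySem.List.pyRange 2 ((C.length : Int) - 1) 2).all P = true)
  ↔ ∀ j : Int, 1 ≤ j → j < pvL C + 1 → pvS C j = (if j % 2 = 0 then d else -d) := by
  rw [List.all_eq_true]
  rw [← triples_iff_edges (pvS C) ((C.length : Int)) (pvL C) d (pvL_eq_of_ne_three C hm3)]
  constructor
  · intro H i h1 h2 h3
    exact (hP i).mp (H i ((PySem.List.mem_pyRange_iff_of_pos (by norm_num) i).mpr ⟨h1, h2, h3⟩))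
  · intro H i hi
    obtain ⟨h1, h2, h3⟩ := (PySem.List.mem_pyRange_iff_of_pos (by norm_num) i).mp hi
    exact (hP i).mpr (H i h1 h2 h3)

theorem isAes_iff (C : List Int) (h2 : 2 ≤ C.length) :
    (isAesthetic C = true) ↔
      (pvS C 0 ≠ 0 ∧ ∀ j : Int, 1 ≤ j → j < pvL C + 1 →
        pvS C j = (if j % 2 = 0 then pvS C 0 else -(pvS C 0))) := by
  have hm2 : (2 : Int) ≤ (C.length : Int) := by exact_mod_cast h2
  have hS0 : pvS C 0 = pvSign (pvG C 0) (pvG C 1) := by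
    unfold pvS; norm_num
  have hS1 : pvS C 1 = pvSign (pvG C 1) (pvG C 2) := by
    unfold pvS; norm_num
  have hfold : ∀ i : Int, PySem.List.pyGetD C i 0 = pvG C i := fun _ => rfl
  simp only [isAesthetic, PySem.List.len_eq, hfold]
  rcases lt_trichotomy (pvG C 0) (pvG C 1) with h | h | h
  · -- increasing start: ty = 0, s0 = 1
    have hs0 : pvS C 0 = 1 := by rw [hS0]; exact (pvSign_eq_one_iff _ _).mpr h
    rw [show (if pvG C 0 < pvG C 1 then (0:Int) else if pvG C 0 > pvG C 1 then 1 else -1) = 0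
        from if_pos h]
    rw [if_neg (by norm_num), if_pos rfl]
    simp only [hs0]
    by_cases hm3 : (C.length : Int) = 3
    · have hL3 : pvL C = 1 := by unfold pvL; rw [if_pos (Or.inr hm3), hm3]; norm_num
      rw [hL3]
      by_cases hle : pvG C 1 ≤ pvG C 2
      · rw [if_pos ⟨hm3, hle⟩]
        simp only [Bool.false_eq_true, false_iff, not_and]
        intro _ Hj
        have h1 := Hj 1 (by omega) (by omega)
        rw [if_neg (by norm_num)] at h1
        rw [hS1] at h1
        have := (pvSign_eq_neg_one_iff (pvG C 1) (pvG C 2)).mp h1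
        omega
      · rw [if_neg (by intro hc; exact hle hc.2)]
        rw [hm3, show (3:Int) - 1 = 2 by norm_num]
        rw [show PySem.List.pyRange 2 2 2 = [] from rfl]
        constructor
        · intro _
          refine ⟨by norm_num, ?_⟩
          intro j h1 hj
          have hj1 : j = 1 := by omega
          subst hj1
          rw [if_neg (by norm_num), hS1, pvSign_eq_neg_one_iff]
          omega
        · intro _; rfl
    · rw [if_neg (by intro hc; exact hm3 hc.1)]
      have := all_triples_iff C 1 (fun i => decide (pvG C (i - 1) > pvG C i ∧ pvG C i < pvG C (i + 1)))
        (fun i => by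
          simp only [decide_eq_true_eq]
          constructor
          · intro ⟨ha, hb⟩
            constructor
            · unfold pvS; rw [show i - 1 + 1 = i by ring]
              exact (pvSign_eq_neg_one_iff _ _).mpr ha
            · unfold pvS; exact (pvSign_eq_one_iff _ _).mpr hb
          · intro ⟨ha, hb⟩
            unfold pvS at ha hb
            rw [show i - 1 + 1 = i by ring] at ha
            exact ⟨(pvSign_eq_neg_one_iff _ _).mp ha, (pvSign_eq_one_iff _ _).mp hb⟩) hm3
      rw [this]
      simp only [ne_eq, one_ne_zero, not_false_eq_true, true_and]
  · -- equal start: ty = -1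
    have hs0 : pvS C 0 = 0 := by rw [hS0]; exact (pvSign_eq_zero_iff _ _).mpr h
    rw [show (if pvG C 0 < pvG C 1 then (0:Int) else if pvG C 0 > pvG C 1 then 1 else -1) = -1
        from by rw [if_neg (by omega), if_neg (by omega)]]
    rw [if_pos rfl]
    simp [hs0]
  · -- decreasing start: ty = 1, s0 = -1
    have hs0 : pvS C 0 = -1 := by rw [hS0]; exact (pvSign_eq_neg_one_iff _ _).mpr h
    rw [show (if pvG C 0 < pvG C 1 then (0:Int) else if pvG C 0 > pvG C 1 then 1 else -1) = 1
        from by rw [if_neg (by omega), if_pos (by omega)]]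
    rw [if_neg (by norm_num), if_neg (by norm_num)]
    simp only [hs0]
    by_cases hm3 : (C.length : Int) = 3
    · have hL3 : pvL C = 1 := by unfold pvL; rw [if_pos (Or.inr hm3), hm3]; norm_num
      rw [hL3]
      by_cases hle : pvG C 1 ≥ pvG C 2
      · rw [if_pos ⟨hm3, hle⟩]
        simp only [Bool.false_eq_true, false_iff, not_and]
        intro _ Hj
        have h1 := Hj 1 (by omega) (by omega)
        rw [if_neg (by norm_num)] at h1
        rw [hS1] at h1
        have := (pvSign_eq_one_iff (pvG C 1) (pvG C 2)).mp (by rw [h1]; norm_num)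
        omega
      · rw [if_neg (by intro hc; exact hle hc.2)]
        rw [hm3, show (3:Int) - 1 = 2 by norm_num]
        rw [show PySem.List.pyRange 2 2 2 = [] from rfl]
        constructor
        · intro _
          refine ⟨by norm_num, ?_⟩
          intro j h1 hj
          have hj1 : j = 1 := by omega
          subst hj1
          rw [if_neg (by norm_num), hS1]
          rw [show -(-1 : Int) = 1 by norm_num, pvSign_eq_one_iff]
          omega
        · intro _; rfl
    · rw [if_neg (by intro hc; exact hm3 hc.1)]
      have := all_triples_iff C (-1) (fun i => decide (pvG C (i - 1) < pvG C i ∧ pvG C i > pvG C (i + 1)))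
        (fun i => by
          simp only [decide_eq_true_eq]
          constructor
          · intro ⟨ha, hb⟩
            constructor
            · unfold pvS; rw [show i - 1 + 1 = i by ring]
              rw [show -(-1 : Int) = 1 by norm_num]
              exact (pvSign_eq_one_iff _ _).mpr ha
            · unfold pvS; exact (pvSign_eq_neg_one_iff _ _).mpr hb
          · intro ⟨ha, hb⟩
            unfold pvS at ha hb
            rw [show i - 1 + 1 = i by ring, show -(-1 : Int) = 1 by norm_num] at ha
            exact ⟨(pvSign_eq_one_iff _ _).mp ha, (pvSign_eq_neg_one_iff _ _).mp hb⟩) hm3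
      rw [this]
      constructor
      · intro H
        refine ⟨by norm_num, fun j h1 hj => ?_⟩
        have := H j h1 hj
        split_ifs at this ⊢ <;> omega
      · intro ⟨_, H⟩ j h1 hj
        have := H j h1 hj
        split_ifs at this ⊢ <;> omega

theorem isAes_chain (C : List Int) (h2 : 2 ≤ C.length) :
    (isAesthetic C = true) ↔ pvChainTo C (pvL C) := by
  rw [isAes_iff C h2]
  exact and_congr_right fun _ => (chain_iff_pointwise (pvS C) (pvL C)).symm

-- A's checker = full zigzag OR semi-not-full
theorem isAes_spec (C : List Int) (h2 : 2 ≤ C.length) :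
    (isAesthetic C = true) ↔ (pvZZ C ∨ pvSNF C) := by
  rw [isAes_chain C h2]
  by_cases hodd5 : C.length % 2 = 1 ∧ 5 ≤ C.length
  · obtain ⟨hodd, h5⟩ := hodd5
    have hm3 : (C.length : Int) ≠ 3 := by omega
    have hLval : pvL C = (C.length : Int) - 3 := by
      rw [pvL_eq_of_ne_three C hm3, if_neg (by omega)]
    have hdl2 : 2 ≤ (C.dropLast).length := by rw [List.length_dropLast]; omega
    have hchain : pvChainTo C (pvL C) ↔ pvZZ (C.dropLast) := by
      rw [hLval, chainTo_dropLast C ((C.length : Int) - 3) (by omega) (by omega),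
          pvZZ_iff_chain (C.dropLast) hdl2]
      rw [show ((C.dropLast.length : Int) - 2) = (C.length : Int) - 3 by
        rw [List.length_dropLast]; omega]
    rw [hchain]
    constructor
    · intro hdl
      by_cases hzz : pvZZ C
      · exact Or.inl hzz
      · exact Or.inr ⟨h5, hodd, hdl, hzz⟩
    · rintro (hzz | ⟨_, _, hdl, _⟩)
      · exact pvZZ_dropLast_of C hzz
      · exact hdl
  · have hSNF : ¬ pvSNF C := by intro ⟨h5, hodd, _, _⟩; exact hodd5 ⟨hodd, h5⟩
    have hLval : pvL C = (C.length : Int) - 2 := by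
      by_cases hm3 : (C.length : Int) = 3
      · unfold pvL; rw [if_pos (Or.inr hm3), hm3]
      · rw [pvL_eq_of_ne_three C hm3, if_pos (by omega)]
    rw [hLval, ← pvZZ_iff_chain C h2]
    constructor
    · exact Or.inl
    · rintro (h | h)
      · exact h
      · exact absurd h hSNF

-- counting helpers
theorem foldl_count_shift (p : Int → Bool) (l : List Int) :
    ∀ init c : Int, l.foldl (fun r i => if p i then r + 1 else r) (init + c)
      = l.foldl (fun r i => if p i then r + 1 else r) init + c := by
  induction l with
  | nil => intro init c; simp
  | cons x xs ih =>
      intro init c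
      simp only [List.foldl_cons]
      by_cases h : p x
      · rw [if_pos h, if_pos h, show init + c + 1 = (init + 1) + c by ring, ih]
      · rw [if_neg h, if_neg h, ih]

theorem foldl_count_nonneg (p : Int → Bool) (l : List Int) :
    ∀ init : Int, init ≤ l.foldl (fun r i => if p i then r + 1 else r) init := by
  induction l with
  | nil => intro init; simp
  | cons x xs ih =>
      intro init
      simp only [List.foldl_cons]
      have := ih (if p x then init + 1 else init)
      split_ifs at this ⊢ <;> omega

theorem foldl_count_le (p q : Int → Bool) (l : List Int)
    (h : ∀ x ∈ l, q x = true → p x = true) :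
    ∀ init : Int, l.foldl (fun r i => if q i then r + 1 else r) init
      ≤ l.foldl (fun r i => if p i then r + 1 else r) init := by
  induction l with
  | nil => intro init; simp
  | cons x xs ih =>
      intro init
      simp only [List.foldl_cons]
      have hx : q x = true → p x = true := h x (by simp)
      have ihx := ih (fun y hy => h y (by simp [hy]))
      by_cases hq : q x = true
      · rw [if_pos hq, if_pos (hx hq)]; exact ihx _
      · rw [if_neg hq]
        by_cases hp : p x = true
        · rw [if_pos hp]
          calc List.foldl (fun r i => if q i then r + 1 else r) init xs
              ≤ List.foldl (fun r i => if p i then r + 1 else r) init xs := ihx _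
            _ ≤ List.foldl (fun r i => if p i then r + 1 else r) (init + 1) xs := by
                  rw [foldl_count_shift]
                  have := foldl_count_nonneg p xs init
                  omega
        · rw [if_neg hp]; exact ihx _

theorem foldl_count_lt (p q : Int → Bool) (l : List Int)
    (h : ∀ x ∈ l, q x = true → p x = true)
    (x0 : Int) (hx0 : x0 ∈ l) (hp0 : p x0 = true) (hq0 : q x0 = false) :
    ∀ init : Int, l.foldl (fun r i => if q i then r + 1 else r) init
      < l.foldl (fun r i => if p i then r + 1 else r) init := by
  obtain ⟨l1, l2, rfl⟩ := List.append_of_mem hx0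
  intro init
  simp only [List.foldl_append, List.foldl_cons]
  set r1q := List.foldl (fun r i => if q i then r + 1 else r) init l1 with hr1q
  set r1p := List.foldl (fun r i => if p i then r + 1 else r) init l1 with hr1p
  have hle1 : r1q ≤ r1p := foldl_count_le p q l1 (fun y hy => h y (by simp [hy])) init
  rw [if_pos hp0, if_neg (by simp [hq0])]
  have hle2 : List.foldl (fun r i => if q i then r + 1 else r) r1q l2
      ≤ List.foldl (fun r i => if p i then r + 1 else r) r1q l2 :=
    foldl_count_le p q l2 (fun y hy => h y (by simp [hy])) r1q
  have hsh : List.foldl (fun r i => if p i then r + 1 else r) (r1p + 1) l2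
      = List.foldl (fun r i => if p i then r + 1 else r) r1p l2 + 1 :=
    foldl_count_shift p l2 r1p 1
  have hmono : List.foldl (fun r i => if p i then r + 1 else r) r1q l2
      ≤ List.foldl (fun r i => if p i then r + 1 else r) r1p l2 := by
    have := foldl_count_shift p l2 r1q (r1p - r1q)
    rw [show r1q + (r1p - r1q) = r1p by ring] at this
    omega
  omega

-- length-2 lists with distinct entries are full zigzags
theorem pvZZ_pair (x y : Int) (hxy : x ≠ y) : pvZZ [x, y] := by
  constructor
  · intro t ht
    simp only [List.length, List.mem_range] at ht
    interval_cases t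
    · simpa using hxy
  · intro t ht
    simp at ht

-- the loop bodies of the two programs agree when no deletion is semi-not-full
theorem del_eq (A : List Int) (i : Int) (h0 : 0 ≤ i) (hlt : i < (A.length : Int)) :
    ((PySem.List.pop? A i).map Prod.snd).getD [] = A.eraseIdx i.toNat
    ∧ PySem.List.slice A none (some i) ++ PySem.List.slice A (some (i + 1)) none
      = A.eraseIdx i.toNat := by
  have hlt' : i.toNat < A.length := by omega
  constructor
  · have h := PySem.List.pop?_natCast A i.toNat hlt'
    rw [Int.toNat_of_nonneg h0] at h
    rw [h]; rfl
  · rw [PySem.List.slice_to A (by omega), PySem.List.slice_from A (by omega)]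
    rw [show (i + 1).toNat = i.toNat + 1 by omega]
    exact (List.eraseIdx_eq_take_drop_succ A i.toNat).symm

-- ===== VERDICT (by name: the statements are the Claim_ definitions above) =====
theorem solution_spec : Claim_unchanged_solution := by
  intro A _ hPre
  unfold Spec_solution
  intro hnD
  obtain ⟨hlen, h2eq⟩ := hPre
  unfold D_solution at hnD
  push Not at hnD
  obtain ⟨hSA, hrest⟩ := hnD
  by_cases hz : pvZZ A
  · have hA : isAesthetic A = true := (isAes_spec A hlen).mpr (Or.inl hz)
    have hB : pvZig A = true := (pvZig_ZZ A hlen).mpr hz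
    simp [solution, solution_alt, hA, hB]
  · have hdel : ∀ i ∈ List.range A.length, ¬ pvSNF (A.eraseIdx i) := hrest hz
    have hA : isAesthetic A = false := by
      have : ¬ isAesthetic A = true := fun h => ((isAes_spec A hlen).mp h).elim hz hSA
      simpa using this
    have hB : pvZig A = false := by
      have : ¬ pvZig A = true := fun h => hz ((pvZig_ZZ A hlen).mp h)
      simpa using this
    have hlen3 : 3 ≤ A.length := by
      by_contra hcon
      have hlen2 : A.length = 2 := by omega
      rcases A with _ | ⟨x, B⟩
      · simp at hlen2
      rcases B with _ | ⟨y, B2⟩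
      · simp at hlen2
      rcases B2 with _ | ⟨z, B3⟩
      · have hxy : x ≠ y := by
          have hne := h2eq (by simp)
          intro hc; subst hc; exact hne rfl
        exact hz (pvZZ_pair x y hxy)
      · simp at hlen2
    simp only [solution, solution_alt, hA, hB, Bool.false_eq_true, if_false, PySem.List.len_eq]
    have hbody : ∀ (r : Int), ∀ i ∈ PySem.List.pyRange 0 ((A.length : Int)) 1,
        (if isAesthetic (((PySem.List.pop? A i).map Prod.snd).getD []) then r + 1 else r)
      = (if pvZig (PySem.List.slice A none (some i) ++ PySem.List.slice A (some (i + 1)) none)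
         then r + 1 else r) := by
      intro r i hi
      obtain ⟨h0, h1⟩ := PySem.List.mem_pyRange_one.mp hi
      obtain ⟨hpop, hsl⟩ := del_eq A i h0 h1
      have hdlen : (A.eraseIdx i.toNat).length = A.length - 1 :=
        List.length_eraseIdx_of_lt (by omega)
      have h2' : 2 ≤ (A.eraseIdx i.toNat).length := by omega
      rw [hpop, hsl]
      have hS : ¬ pvSNF (A.eraseIdx i.toNat) :=
        hdel i.toNat (by rw [List.mem_range]; omega)
      have : isAesthetic (A.eraseIdx i.toNat) = pvZig (A.eraseIdx i.toNat) := by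
        rw [← Bool.coe_iff_coe, isAes_spec _ h2', pvZig_ZZ _ h2']
        constructor
        · rintro (h | h)
          · exact h
          · exact absurd h hS
        · exact Or.inl
      rw [this]
    rw [PySem.List.foldl_congr_mem _ _ _ _ (fun r i hi => hbody r i hi)]
    set res : Int := (PySem.List.pyRange 0 ((A.length : Int)) 1).foldl
      (fun r i => if pvZig (PySem.List.slice A none (some i) ++ PySem.List.slice A (some (i + 1)) none)
        then r + 1 else r) 0 with hres
    by_cases h0 : res = 0
    · simp [h0]
    · simp [h0]

theorem solution_changed : Claim_changed_solution := by
  unfold Claim_changed_solution; decide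

theorem solution_tight : Claim_exact_solution := by
  intro A _ hPre hD
  obtain ⟨hlen, _⟩ := hPre
  by_cases hS : pvSNF A
  · -- A thinks A is aesthetic and returns 0; B does not, and never returns 0 then
    have hA : isAesthetic A = true := (isAes_spec A hlen).mpr (Or.inr hS)
    have hz : ¬ pvZZ A := hS.2.2.2
    have hB : pvZig A = false := by
      have : ¬ pvZig A = true := fun h => hz ((pvZig_ZZ A hlen).mp h)
      simpa using this
    simp only [solution, solution_alt, hA, hB, Bool.false_eq_true, if_false, if_true,
      PySem.List.len_eq]
    set res : Int := (PySem.List.pyRange 0 ((A.length : Int)) 1).foldl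
      (fun r i => if pvZig (PySem.List.slice A none (some i) ++ PySem.List.slice A (some (i + 1)) none)
        then r + 1 else r) 0 with hres
    have hnn : (0 : Int) ≤ res := foldl_count_nonneg _ _ 0
    by_cases h0 : res = 0
    · simp [h0]
    · simp [h0]; omega
  · -- some deletion is semi-not-full: A counts strictly more deletions than B
    have hD' : ¬ pvZZ A ∧ ∃ i ∈ List.range A.length, pvSNF (A.eraseIdx i) := by
      unfold D_solution at hD
      rcases hD with h | h
      · exact absurd h hS
      · exact h
    obtain ⟨hz, i0, hi0, hSi0⟩ := hD'
    have hA : isAesthetic A = false := by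
      have : ¬ isAesthetic A = true := fun h => ((isAes_spec A hlen).mp h).elim hz hS
      simpa using this
    have hB : pvZig A = false := by
      have : ¬ pvZig A = true := fun h => hz ((pvZig_ZZ A hlen).mp h)
      simpa using this
    rw [List.mem_range] at hi0
    have hlen6 : 6 ≤ A.length := by
      have h5 := hSi0.1
      have := List.length_eraseIdx_of_lt hi0
      omega
    simp only [solution, solution_alt, hA, hB, Bool.false_eq_true, if_false, PySem.List.len_eq]
    -- rewrite A's loop to the same index list with predicate "isAesthetic of eraseIdx"
    have hbodyA : ∀ (r : Int), ∀ i ∈ PySem.List.pyRange 0 ((A.length : Int)) 1,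
        (if isAesthetic (((PySem.List.pop? A i).map Prod.snd).getD []) then r + 1 else r)
      = (if isAesthetic (A.eraseIdx i.toNat) then r + 1 else r) := by
      intro r i hi
      obtain ⟨h0, h1⟩ := PySem.List.mem_pyRange_one.mp hi
      rw [(del_eq A i h0 h1).1]
    have hbodyB : ∀ (r : Int), ∀ i ∈ PySem.List.pyRange 0 ((A.length : Int)) 1,
        (if pvZig (PySem.List.slice A none (some i) ++ PySem.List.slice A (some (i + 1)) none)
           then r + 1 else r)
      = (if pvZig (A.eraseIdx i.toNat) then r + 1 else r) := by
      intro r i hi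
      obtain ⟨h0, h1⟩ := PySem.List.mem_pyRange_one.mp hi
      rw [(del_eq A i h0 h1).2]
    rw [PySem.List.foldl_congr_mem _ _ _ _ (fun r i hi => hbodyA r i hi),
        PySem.List.foldl_congr_mem _ _ _ _ (fun r i hi => hbodyB r i hi)]
    have himp : ∀ x ∈ PySem.List.pyRange 0 ((A.length : Int)) 1,
        pvZig (A.eraseIdx x.toNat) = true → isAesthetic (A.eraseIdx x.toNat) = true := by
      intro x hx h
      obtain ⟨h0, h1⟩ := PySem.List.mem_pyRange_one.mp hx
      have h2' : 2 ≤ (A.eraseIdx x.toNat).length := by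
        have := List.length_eraseIdx_of_lt (show x.toNat < A.length by omega)
        omega
      exact (isAes_spec _ h2').mpr (Or.inl ((pvZig_ZZ _ h2').mp h))
    have hdl2 : 2 ≤ (A.eraseIdx i0).length := by
      have := List.length_eraseIdx_of_lt hi0
      omega
    have hx0mem : ((i0 : Int)) ∈ PySem.List.pyRange 0 ((A.length : Int)) 1 :=
      PySem.List.mem_pyRange_one.mpr ⟨by omega, by exact_mod_cast hi0⟩
    have hx0nat : ((i0 : Int)).toNat = i0 := by omega
    have hp0 : isAesthetic (A.eraseIdx ((i0 : Int)).toNat) = true := by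
      rw [hx0nat]; exact (isAes_spec _ hdl2).mpr (Or.inr hSi0)
    have hq0 : pvZig (A.eraseIdx ((i0 : Int)).toNat) = false := by
      rw [hx0nat]
      have : ¬ pvZig (A.eraseIdx i0) = true := fun h =>
        hSi0.2.2.2 ((pvZig_ZZ _ hdl2).mp h)
      simpa using this
    have hlt := foldl_count_lt
      (fun x => isAesthetic (A.eraseIdx x.toNat))
      (fun x => pvZig (A.eraseIdx x.toNat))
      (PySem.List.pyRange 0 ((A.length : Int)) 1)
      himp ((i0 : Int)) hx0mem hp0 hq0 0
    have hnnB : (0 : Int) ≤ (PySem.List.pyRange 0 ((A.length : Int)) 1).foldl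
        (fun r x => if pvZig (A.eraseIdx x.toNat) then r + 1 else r) 0 :=
      foldl_count_nonneg _ _ 0
    set cA : Int := (PySem.List.pyRange 0 ((A.length : Int)) 1).foldl
      (fun r x => if isAesthetic (A.eraseIdx x.toNat) then r + 1 else r) 0 with hcA
    set cB : Int := (PySem.List.pyRange 0 ((A.length : Int)) 1).foldl
      (fun r x => if pvZig (A.eraseIdx x.toNat) then r + 1 else r) 0 with hcB
    have hAne : ¬ cA = 0 := by omega
    rw [if_neg hAne]
    by_cases h0 : cB = 0
    · rw [if_neg (by simp [h0])]; omega
    · rw [if_pos (by simp [h0])]; omega
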